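-- pv_equiv track=rewrite | github.com/arnav-exe/giga-mcp | src/instant_context/discovery/authority.py | _pypi_repository_url
-- ===== SOURCE A (Python) =====
-- def _normalize_url(raw: object) -> str | None:
--     if not isinstance(raw, str) or not raw.strip():
--         return None
--     value = raw.strip()
--     if value.startswith("git+"):
--         value = value[4:]
--     if value.endswith(".git"):
--         value = value[:-4]
--     return value
--
-- def _normalize_project_urls(project_urls: object) -> dict[str, str]:
--     if not isinstance(project_urls, dict):
--         return {}
--     normalized = {}
--     for key, value in project_urls.items():
--         if not key:
--             continue
--         url = _normalize_url(value)
--         if url: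
--             normalized[key] = url
--     return normalized
--
-- def _pypi_repository_url(project_urls: object, home_page: object) -> str | None:
--     urls = _normalize_project_urls(project_urls)
--     for key in urls:
--         if "repo" in key.lower() or "source" in key.lower() or "code" in key.lower():
--             return urls[key]
--     for value in urls.values():
--         if "github.com" in value.lower():
--             return value
--     return _normalize_url(home_page)
-- ===== SOURCE B (Python) =====
-- def _normalize_url(raw: object) -> str | None:
--     if not isinstance(raw, str) or not raw.strip():
--         return None
--     value = raw.strip()
--     if value.startswith("git+"):
--         value = value[4:]
--     if value.endswith(".git"):
--         value = value[:-4]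
--     return value
--
--
-- def _pypi_repository_url(project_urls: object, home_page: object) -> str | None:
--     # Rank-and-select: emit every candidate url with a priority tier
--     # (0 = keyword-matching key, 1 = github.com url), then take the single
--     # best candidate with min(); Python's min returns the FIRST minimal
--     # element, which reproduces the positional tie-breaking.
--     candidates = []
--     if isinstance(project_urls, dict):
--         for key, value in project_urls.items():
--             if not key:
--                 continue
--             url = _normalize_url(value)
--             if not url:
--                 continue
--             k = key.lower()
--             if "repo" in k or "source" in k or "code" in k:
--                 candidates.append((0, url))
--             if "github.com" in url.lower():
--                 candidates.append((1, url))
--     if candidates: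
--         return min(candidates, key=lambda c: c[0])[1]
--     return _normalize_url(home_page)
-- ===== Notes on version B (the rewrite author's own statement) =====
-- stated objective: alternative
-- what changed: B replaces A's staged early-return scans over a normalized dict (keys with a lookup, then values) by a rank-and-select algorithm with no intermediate dict: it emits each url as a (tier, url) candidate during normalization (tier 0 for keyword keys, tier 1 for github urls) and picks the single best candidate with one min-by-tier selection.
import Mathlib
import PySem

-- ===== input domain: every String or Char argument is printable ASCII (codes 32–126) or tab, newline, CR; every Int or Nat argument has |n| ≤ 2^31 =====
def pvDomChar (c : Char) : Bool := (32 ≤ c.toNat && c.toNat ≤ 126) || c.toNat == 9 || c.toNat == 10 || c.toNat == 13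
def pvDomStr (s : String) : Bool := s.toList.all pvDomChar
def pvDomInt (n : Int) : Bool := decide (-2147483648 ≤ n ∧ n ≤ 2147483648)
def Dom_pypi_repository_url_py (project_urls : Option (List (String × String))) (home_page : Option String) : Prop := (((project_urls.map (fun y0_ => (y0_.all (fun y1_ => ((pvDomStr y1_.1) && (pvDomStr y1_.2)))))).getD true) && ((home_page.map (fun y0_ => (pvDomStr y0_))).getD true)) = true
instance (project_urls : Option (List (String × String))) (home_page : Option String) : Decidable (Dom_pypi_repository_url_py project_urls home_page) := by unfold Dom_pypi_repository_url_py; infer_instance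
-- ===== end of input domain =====

-- B replaces A's staged early-return scans over a normalized dict by a rank-and-select
-- algorithm: emit (tier, url) candidates in one normalization pass, pick min by tier;
-- objective: alternative algorithm of the same cost.

-- ===== PORT A =====

-- _normalize_url on a str argument (shared-module helper used by both sources)
def pvNormStr (s : String) : Option String :=
  if PySem.Str.strip s = "" then none
  else
    let value := PySem.Str.strip s
    let value := if PySem.Str.startswith value "git+" then PySem.Str.slice value (some 4) none else value
    let value := if PySem.Str.endswith value ".git" then PySem.Str.slice value none (some (-4)) else value
    some value

def pvNormUrl (raw : Option String) : Option String :=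
  match raw with
  | none => none          -- not isinstance(raw, str)
  | some s => pvNormStr s

-- "repo" in key.lower() or "source" in key.lower() or "code" in key.lower()
def pvKwMatch (k : String) : Bool :=
  PySem.Str.isIn "repo" (PySem.Str.lower k) || PySem.Str.isIn "source" (PySem.Str.lower k)
    || PySem.Str.isIn "code" (PySem.Str.lower k)

-- "github.com" in value.lower()
def pvGhMatch (v : String) : Bool := PySem.Str.isIn "github.com" (PySem.Str.lower v)

-- the loop body's guards, identical in both Pythons:
-- 'if not key: continue; url = _normalize_url(value); if url: <use (key, url)>'
def pvNormItem (kv : String × String) : Option (String × String) :=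
  if kv.1 = "" then none
  else
    match pvNormStr kv.2 with
    | none => none
    | some url => if url = "" then none else some (kv.1, url)

-- one step of _normalize_project_urls's loop ('normalized[key] = url')
def pvNormStepA (d : PySem.Dict String String) (kv : String × String) : PySem.Dict String String :=
  match pvNormItem kv with
  | none => d
  | some p => d.insert p.1 p.2

-- _normalize_project_urls; the assoc list denotes the input dict, so the loop
-- iterates the dict's (deduplicated, insertion-ordered) items
def pvNormalizeA (project_urls : Option (List (String × String))) : PySem.Dict String String :=
  match project_urls with
  | none => PySem.Dict.empty          -- not isinstance(project_urls, dict)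
  | some l => (PySem.Dict.ofList l).items.foldl pvNormStepA PySem.Dict.empty

-- 'for key in urls: if <keyword>: return urls[key]'
def pvKeyScanA (urls : PySem.Dict String String) : List String → Option String
  | [] => none
  | k :: rest => if pvKwMatch k then urls.get? k else pvKeyScanA urls rest

-- 'for value in urls.values(): if "github.com" in value.lower(): return value'
def pvValScanA : List String → Option String
  | [] => none
  | v :: rest => if pvGhMatch v then some v else pvValScanA rest

def pypi_repository_url_py (project_urls : Option (List (String × String))) (home_page : Option String) : Option String :=
  let urls := pvNormalizeA project_urls
  match pvKeyScanA urls urls.keys with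
  | some v => some v
  | none =>
    match pvValScanA urls.values with
    | some v => some v
    | none => pvNormUrl home_page

-- ===== PORT B =====

-- Source B's loop body: append (0, url) on a keyword key, (1, url) on a github url
def pvCandStep (acc : List (Int × String)) (kv : String × String) : List (Int × String) :=
  match pvNormItem kv with
  | none => acc
  | some p =>
    let acc1 := if pvKwMatch p.1 then acc ++ [((0 : Int), p.2)] else acc
    if pvGhMatch p.2 then acc1 ++ [((1 : Int), p.2)] else acc1

def pypi_repository_url_py_alt (project_urls : Option (List (String × String))) (home_page : Option String) : Option String :=
  let cands : List (Int × String) :=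
    match project_urls with
    | none => []                      -- not isinstance(project_urls, dict)
    | some l => (PySem.Dict.ofList l).items.foldl pvCandStep []
  -- 'min(candidates, key=lambda c: c[0])[1]' (first minimal) if candidates else fallback
  match PySem.List.min? cands Prod.fst with
  | some c => some c.2
  | none => pvNormUrl home_page

-- ===== PRECONDITION & SPEC =====
def Spec_pypi_repository_url_py (project_urls : Option (List (String × String))) (home_page : Option String) (out : Option String) : Prop := out = pypi_repository_url_py_alt project_urls home_page
instance (project_urls : Option (List (String × String))) (home_page : Option String) (out : Option String) : Decidable (Spec_pypi_repository_url_py project_urls home_page out) := by unfold Spec_pypi_repository_url_py; infer_instance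

-- ===== CLAIM =====
def Claim_equal_pypi_repository_url_py : Prop := ∀ (project_urls : Option (List (String × String))) (home_page : Option String), Dom_pypi_repository_url_py project_urls home_page → Spec_pypi_repository_url_py project_urls home_page (pypi_repository_url_py project_urls home_page)

-- ===== LEMMAS AND PROOFS =====

-- the candidates one item contributes
def pvCandOf (p : String × String) : List (Int × String) :=
  (if pvKwMatch p.1 then [((0 : Int), p.2)] else []) ++ (if pvGhMatch p.2 then [((1 : Int), p.2)] else [])

theorem pvCandStep_append (acc : List (Int × String)) (kv : String × String) :
    pvCandStep acc kv = acc ++ (match pvNormItem kv with | none => [] | some p => pvCandOf p) := by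
  unfold pvCandStep pvCandOf
  cases pvNormItem kv with
  | none => simp
  | some p =>
    by_cases hk : pvKwMatch p.1 <;> by_cases hg : pvGhMatch p.2 <;> simp [hk, hg]

-- keys of every candidate are 0 or 1
theorem pvCandOf_keys (p : String × String) (x : Int × String) (hx : x ∈ pvCandOf p) :
    x.1 = 0 ∨ x.1 = 1 := by
  unfold pvCandOf at hx
  rcases List.mem_append.1 hx with h | h <;> split at h <;> simp_all

-- min? over a list whose keys are all 0/1: frozen once a key-0 accumulator is reached
def pvMinStep (acc : Option (Int × String)) (x : Int × String) : Option (Int × String) :=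
  match acc with
  | none => some x
  | some n => if x.1 < n.1 then some x else some n

theorem pvMin?_eq_foldl (c : List (Int × String)) :
    PySem.List.min? c Prod.fst = c.foldl pvMinStep none := by
  unfold PySem.List.min?
  congr 1
  funext acc x
  cases acc <;> rfl

theorem pvFold0 (c : List (Int × String)) (h : ∀ x ∈ c, x.1 = 0 ∨ x.1 = 1)
    (m : Int × String) (hm : m.1 = 0) :
    c.foldl pvMinStep (some m) = some m := by
  induction c with
  | nil => rfl
  | cons x t ih =>
    have hx := h x (List.mem_cons_self ..)
    rw [List.foldl_cons]
    show t.foldl pvMinStep (if x.1 < m.1 then some x else some m) = some m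
    rw [if_neg (by omega)]
    exact ih (fun y hy => h y (List.mem_cons_of_mem _ hy))

theorem pvFold1 (c : List (Int × String)) (h : ∀ x ∈ c, x.1 = 0 ∨ x.1 = 1)
    (m : Int × String) (hm : m.1 = 1) :
    c.foldl pvMinStep (some m)
      = (match c.find? (fun x => x.1 == 0) with | some x => some x | none => some m) := by
  induction c with
  | nil => rfl
  | cons x t ih =>
    have hx := h x (List.mem_cons_self ..)
    have ht : ∀ y ∈ t, y.1 = 0 ∨ y.1 = 1 := fun y hy => h y (List.mem_cons_of_mem _ hy)
    rw [List.foldl_cons, List.find?_cons]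
    show t.foldl pvMinStep (if x.1 < m.1 then some x else some m) = _
    rcases hx with h0 | h1
    · rw [if_pos (by omega), pvFold0 t ht x h0]
      have hb : (x.1 == 0) = true := by simp [h0]
      rw [hb]
    · rw [if_neg (by omega), ih ht]
      have hb : (x.1 == 0) = false := by simp [h1]
      rw [hb]

theorem pvFoldN (c : List (Int × String)) (h : ∀ x ∈ c, x.1 = 0 ∨ x.1 = 1) :
    PySem.List.min? c Prod.fst
      = (match c.find? (fun x => x.1 == 0) with | some x => some x | none => c.head?) := by
  rw [pvMin?_eq_foldl]
  cases c with
  | nil => rfl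
  | cons x t =>
    have hx := h x (List.mem_cons_self ..)
    have ht : ∀ y ∈ t, y.1 = 0 ∨ y.1 = 1 := fun y hy => h y (List.mem_cons_of_mem _ hy)
    rw [List.foldl_cons, List.find?_cons]
    show t.foldl pvMinStep (some x) = _
    rcases hx with h0 | h1
    · rw [pvFold0 t ht x h0]
      have hb : (x.1 == 0) = true := by simp [h0]
      rw [hb]
    · rw [pvFold1 t ht x h1]
      have hb : (x.1 == 0) = false := by simp [h1]
      rw [hb]
      show _ = (match t.find? (fun x => x.1 == 0) with | some x => some x | none => (x :: t).head?)
      cases t.find? (fun x => x.1 == 0) <;> rfl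

-- find? for tier-0 candidates in the emitted stream = first keyword item
theorem pvFindZero (m : List (String × String)) :
    (m.flatMap pvCandOf).find? (fun x => x.1 == 0)
      = (m.find? (fun p => pvKwMatch p.1)).map (fun p => ((0 : Int), p.2)) := by
  induction m with
  | nil => rfl
  | cons p t ih =>
    rw [List.flatMap_cons, List.find?_append, List.find?_cons]
    by_cases hk : pvKwMatch p.1
    · simp [pvCandOf, hk]
    · simp only [pvCandOf, hk, if_false, List.nil_append, hk, Bool.false_eq_true]
      by_cases hg : pvGhMatch p.2 <;> simp [hg, ih]

-- with no keyword item anywhere, the first candidate is the first github item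
theorem pvHeadGh (m : List (String × String)) (hnone : m.find? (fun p => pvKwMatch p.1) = none) :
    (m.flatMap pvCandOf).head?
      = (m.find? (fun p => pvGhMatch p.2)).map (fun p => ((1 : Int), p.2)) := by
  induction m with
  | nil => rfl
  | cons p t ih =>
    rw [List.find?_cons] at hnone
    by_cases hk : pvKwMatch p.1
    · simp [hk] at hnone
    · simp only [hk, Bool.false_eq_true, if_false] at hnone
      rw [List.flatMap_cons, List.find?_cons]
      by_cases hg : pvGhMatch p.2
      · simp [pvCandOf, hk, hg]
      · simp only [pvCandOf, hk, hg, if_false, List.append_nil, List.nil_append,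
          Bool.false_eq_true]
        exact ih hnone

-- the whole selection: min over the candidate stream = A's staged scans over the items
theorem pvMinCands (m : List (String × String)) :
    PySem.List.min? (m.flatMap pvCandOf) Prod.fst
      = (match m.find? (fun p => pvKwMatch p.1) with
          | some p => some ((0 : Int), p.2)
          | none => (m.find? (fun p => pvGhMatch p.2)).map (fun p => ((1 : Int), p.2))) := by
  have hkeys : ∀ x ∈ m.flatMap pvCandOf, x.1 = 0 ∨ x.1 = 1 := by
    intro x hx
    rcases List.mem_flatMap.1 hx with ⟨p, _, hp⟩
    exact pvCandOf_keys p x hp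
  rw [pvFoldN _ hkeys, pvFindZero]
  cases hf : m.find? (fun p => pvKwMatch p.1) with
  | some p => rfl
  | none => simp only [Option.map_none]; exact pvHeadGh m hf

-- A-side scan characterizations
theorem pvKeyScanA_eq (urls : PySem.Dict String String) (hnd : urls.keys.Nodup)
    (l : List (String × String)) (hsub : ∀ p ∈ l, p ∈ urls.items) :
    pvKeyScanA urls (l.map Prod.fst) = (l.find? (fun p => pvKwMatch p.1)).map Prod.snd := by
  induction l with
  | nil => rfl
  | cons p t ih =>
    by_cases h : pvKwMatch p.1
    · simp only [List.map_cons, pvKeyScanA, h, if_true, List.find?_cons, Option.map_some]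
      exact PySem.Dict.get?_of_mem_items urls (by exact hsub p (List.mem_cons_self ..)) hnd
    · simp only [List.map_cons, pvKeyScanA, h, if_false, Bool.false_eq_true, List.find?_cons]
      exact ih (fun q hq => hsub q (List.mem_cons_of_mem _ hq))

theorem pvValScanA_eq (l : List (String × String)) :
    pvValScanA (l.map Prod.snd) = (l.find? (fun p => pvGhMatch p.2)).map Prod.snd := by
  induction l with
  | nil => rfl
  | cons p t ih =>
    by_cases h : pvGhMatch p.2
    · simp [pvValScanA, h]
    · simp only [List.map_cons, pvValScanA, h, if_false, Bool.false_eq_true, List.find?_cons]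
      exact ih

-- normalized items: keys are preserved by pvNormItem
theorem pvNormItem_fst (kv p : String × String) (h : pvNormItem kv = some p) : p.1 = kv.1 := by
  unfold pvNormItem at h
  by_cases h1 : kv.1 = ""
  · rw [if_pos h1] at h; cases h
  · rw [if_neg h1] at h
    cases hs : pvNormStr kv.2 with
    | none => rw [hs] at h; cases h
    | some url =>
      rw [hs] at h
      dsimp only at h
      by_cases h2 : url = ""
      · rw [if_pos h2] at h; cases h
      · rw [if_neg h2] at h; cases h; rfl

theorem pvFilterMap_keys_sublist (l : List (String × String)) :
    ((l.filterMap pvNormItem).map Prod.fst).Sublist (l.map Prod.fst) := by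
  induction l with
  | nil => simp
  | cons kv t ih =>
    rw [List.filterMap_cons]
    cases h : pvNormItem kv with
    | none => exact (List.map_cons ..) ▸ ih.cons _
    | some p =>
      rw [List.map_cons, List.map_cons, pvNormItem_fst kv p h]
      exact ih.cons₂ _

-- A's dict build = fold of plain inserts over the filterMapped items
theorem pvNormFold_eq (items : List (String × String)) (d : PySem.Dict String String) :
    items.foldl pvNormStepA d
      = (items.filterMap pvNormItem).foldl (fun d p => d.insert p.1 p.2) d := by
  induction items generalizing d with
  | nil => rfl
  | cons kv t ih =>
    rw [List.foldl_cons, List.filterMap_cons]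
    unfold pvNormStepA
    cases pvNormItem kv with
    | none => exact ih d
    | some p => rw [List.foldl_cons]; exact ih _

-- B's candidate build = flatMap over the filterMapped items
theorem pvCandFold_eq (items : List (String × String)) :
    items.foldl pvCandStep [] = (items.filterMap pvNormItem).flatMap pvCandOf := by
  have step : ∀ acc kv, pvCandStep acc kv
      = acc ++ (match pvNormItem kv with | none => [] | some p => pvCandOf p) :=
    pvCandStep_append
  have : ∀ (l : List (String × String)) (acc : List (Int × String)),
      l.foldl pvCandStep acc = acc ++ (l.filterMap pvNormItem).flatMap pvCandOf := by
    intro l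
    induction l with
    | nil => simp
    | cons kv t ih =>
      intro acc
      rw [List.foldl_cons, step, List.filterMap_cons]
      cases pvNormItem kv with
      | none => simp [ih]
      | some p => rw [ih, List.flatMap_cons, List.append_assoc]
  simpa using this items []

-- ===== VERDICT =====
theorem pypi_repository_url_py_spec : Claim_equal_pypi_repository_url_py := by
  intro project_urls home_page _
  unfold Spec_pypi_repository_url_py pypi_repository_url_py pypi_repository_url_py_alt
  cases project_urls with
  | none => rfl
  | some l =>
    simp only [pvNormalizeA]
    set items := (PySem.Dict.ofList l).items with hitems
    set nitems := items.filterMap pvNormItem with hnitems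
    -- A's dict
    rw [pvNormFold_eq, pvCandFold_eq, pvMinCands]
    have hndkeys : (nitems.map Prod.fst).Nodup := by
      have : ((PySem.Dict.ofList l).keys).Nodup := PySem.Dict.nodup_keys_ofList l
      exact (pvFilterMap_keys_sublist items).nodup this
    have hfresh := PySem.Dict.items_foldl_insert_fresh (l := nitems)
      (k := Prod.fst) (v := Prod.snd) (d := PySem.Dict.empty)
      (by intro a _; exact PySem.Dict.contains_empty a.1) hndkeys
    set urls := nitems.foldl (fun d p => d.insert p.1 p.2) PySem.Dict.empty with hurls
    have hitems' : urls.items = nitems := by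
      have : (fun (a : String × String) => (a.1, a.2)) = id := by funext a; rfl
      simpa [this] using hfresh
    have hkeys : urls.keys = nitems.map Prod.fst := by
      show urls.items.map Prod.fst = _
      rw [hitems']
    have hvals : urls.values = nitems.map Prod.snd := by
      show urls.items.map Prod.snd = _
      rw [hitems']
    have hnd : urls.keys.Nodup := by rw [hkeys]; exact hndkeys
    rw [hkeys, hvals, pvKeyScanA_eq urls hnd nitems (fun p hp => hitems' ▸ hp), pvValScanA_eq]
    cases nitems.find? (fun p => pvKwMatch p.1) <;>
      cases nitems.find? (fun p => pvGhMatch p.2) <;> rfl
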